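-- pv_equiv track=rewrite | github.com/anx00/helios | scripts/generate_pws_settlement_peak_report.py | _overall_highlights
-- ===== SOURCE A (Python) =====
-- from typing import Any, Dict, Iterable, List, Optional, Sequence, Tuple
--
-- def _overall_highlights(station_rows: Sequence[Dict[str, Any]]) -> Dict[str, Any]:
--     peak_candidates = [row for row in station_rows if row.get("recommendation") == "Peak-hour candidate"]
--     day_candidates = [row for row in station_rows if row.get("recommendation") == "Day-ahead value candidate"]
--     confirmation = [row for row in station_rows if row.get("recommendation") == "Confirmation only"]
--     return {
--         "peak_candidates": peak_candidates,
--         "day_candidates": day_candidates,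
--         "confirmation": confirmation,
--     }
-- ===== SOURCE B (Python) =====
-- def _overall_highlights(station_rows):
--     buckets = {
--         "Peak-hour candidate": [],
--         "Day-ahead value candidate": [],
--         "Confirmation only": [],
--     }
--     for row in station_rows:
--         rec = row.get("recommendation")
--         if rec in buckets:
--             buckets[rec].append(row)
--     return {
--         "peak_candidates": buckets["Peak-hour candidate"],
--         "day_candidates": buckets["Day-ahead value candidate"],
--         "confirmation": buckets["Confirmation only"],
--     }
-- ===== Notes on version B (the rewrite author's own statement) =====
-- stated objective: alternative
-- what changed: B makes one dispatching pass over station_rows, appending each row to the bucket named by its recommendation, instead of A's three separate filtering passes; same asymptotic cost.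
import Mathlib
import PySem

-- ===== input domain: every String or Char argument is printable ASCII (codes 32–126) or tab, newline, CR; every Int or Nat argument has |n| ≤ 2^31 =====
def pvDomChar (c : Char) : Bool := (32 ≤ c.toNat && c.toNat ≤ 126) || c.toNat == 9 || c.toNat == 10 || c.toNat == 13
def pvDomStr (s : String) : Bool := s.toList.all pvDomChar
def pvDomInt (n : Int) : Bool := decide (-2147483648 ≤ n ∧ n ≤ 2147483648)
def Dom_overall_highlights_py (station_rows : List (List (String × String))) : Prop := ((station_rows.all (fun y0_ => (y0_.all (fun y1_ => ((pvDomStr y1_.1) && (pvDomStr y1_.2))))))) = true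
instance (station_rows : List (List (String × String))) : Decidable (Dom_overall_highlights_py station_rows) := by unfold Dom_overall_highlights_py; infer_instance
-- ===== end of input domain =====

-- B replaces A's three filtering passes by one dispatching pass over station_rows (same result, different decomposition).


-- ===== PORT A =====
-- row.get("recommendation") on the association-list row (first match)
def pvGetRec (row : List (String × String)) : Option String :=
  (PySem.Dict.mk row).get? "recommendation"

def overall_highlights_py (station_rows : List (List (String × String))) : List (String × List (List (String × String))) :=
  let peak_candidates := station_rows.filter (fun row => pvGetRec row == some "Peak-hour candidate")
  let day_candidates := station_rows.filter (fun row => pvGetRec row == some "Day-ahead value candidate")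
  let confirmation := station_rows.filter (fun row => pvGetRec row == some "Confirmation only")
  [("peak_candidates", peak_candidates),
   ("day_candidates", day_candidates),
   ("confirmation", confirmation)]

-- ===== PORT B =====
-- one pass: dispatch each row to the bucket named by its recommendation (rows matching no bucket are dropped)
def pvDispatch (st : List (List (String × String)) × List (List (String × String)) × List (List (String × String)))
    (row : List (String × String)) :
    List (List (String × String)) × List (List (String × String)) × List (List (String × String)) :=
  let rec_ := pvGetRec row
  if rec_ == some "Peak-hour candidate" then (st.1 ++ [row], st.2.1, st.2.2)
  else if rec_ == some "Day-ahead value candidate" then (st.1, st.2.1 ++ [row], st.2.2)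
  else if rec_ == some "Confirmation only" then (st.1, st.2.1, st.2.2 ++ [row])
  else st

def overall_highlights_py_alt (station_rows : List (List (String × String))) : List (String × List (List (String × String))) :=
  let buckets := station_rows.foldl pvDispatch ([], [], [])
  [("peak_candidates", buckets.1),
   ("day_candidates", buckets.2.1),
   ("confirmation", buckets.2.2)]

-- ===== PRECONDITION & SPEC =====
def Spec_overall_highlights_py (station_rows : List (List (String × String))) (out : List (String × List (List (String × String)))) : Prop := out = overall_highlights_py_alt station_rows
instance (station_rows : List (List (String × String))) (out : List (String × List (List (String × String)))) : Decidable (Spec_overall_highlights_py station_rows out) := by unfold Spec_overall_highlights_py; infer_instance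

-- ===== CLAIM (what is proved, stated in full; the proofs are below) =====
def Claim_equal_overall_highlights_py : Prop := ∀ (station_rows : List (List (String × String))), Dom_overall_highlights_py station_rows → Spec_overall_highlights_py station_rows (overall_highlights_py station_rows)

-- ===== LEMMAS AND PROOFS =====
-- loop invariant of B's single pass: the fold extends each accumulator by the corresponding filter
theorem pvDispatch_foldl (rows : List (List (String × String)))
    (p d c : List (List (String × String))) :
    rows.foldl pvDispatch (p, d, c) =
      (p ++ rows.filter (fun row => pvGetRec row == some "Peak-hour candidate"),
       d ++ rows.filter (fun row => pvGetRec row == some "Day-ahead value candidate"),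
       c ++ rows.filter (fun row => pvGetRec row == some "Confirmation only")) := by
  induction rows generalizing p d c with
  | nil => simp
  | cons r rs ih =>
    simp only [List.foldl_cons, List.filter_cons, pvDispatch]
    by_cases h1 : pvGetRec r == some "Peak-hour candidate"
    · have h2 : ¬ (pvGetRec r == some "Day-ahead value candidate") := by
        simp_all
      have h3 : ¬ (pvGetRec r == some "Confirmation only") := by
        simp_all
      simp [h1, h2, h3, ih]
    · by_cases h2 : pvGetRec r == some "Day-ahead value candidate"
      · have h3 : ¬ (pvGetRec r == some "Confirmation only") := by
          simp_all
        simp [h1, h2, h3, ih]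
      · by_cases h3 : pvGetRec r == some "Confirmation only"
        · simp [h1, h2, h3, ih]
        · simp [h1, h2, h3, ih]

-- ===== VERDICT (by name: the statement is the Claim_ definition above) =====
theorem overall_highlights_py_spec : Claim_equal_overall_highlights_py := by
  intro rows _
  unfold Spec_overall_highlights_py overall_highlights_py overall_highlights_py_alt
  rw [pvDispatch_foldl]
  simp
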